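-- pv_equiv track=rewrite | github.com/ML-UVA/jhapl-GNN | inrun/models/oldFiles/oldraaapril5.py | edges_to_motif
-- ===== SOURCE A (Python) =====
-- def edges_to_motif(edges):
--
--
--     node_map = {}
--     counter = 0
--
--     lines = []
--     for u, v in edges:
--         if u not in node_map:
--             node_map[u] = f"N{counter}"
--             counter += 1
--         if v not in node_map:
--             node_map[v] = f"N{counter}"
--             counter += 1
--
--         lines.append(f"{node_map[u]} -> {node_map[v]}")
--
--     return "\n".join(lines)
-- ===== SOURCE B (Python) =====
-- def edges_to_motif(edges):
--     # A node's label is the number of DISTINCT nodes that appear strictly before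
--     # its first occurrence in the flattened edge stream: no dict, no counter,
--     # no incremental numbering -- each label is computed by an independent
--     # distinct-prefix count.
--     flat = [x for uv in edges for x in uv]
--     def label(n):
--         return f"N{len(set(flat[:flat.index(n)]))}"
--     return "\n".join(f"{label(u)} -> {label(v)}" for u, v in edges)
-- ===== Notes on version B (the rewrite author's own statement) =====
-- stated objective: alternative
-- what changed: B drops A's mutable dict/counter numbering entirely: it flattens the edges once and computes each node's label independently as the count of distinct elements strictly before that node's first occurrence in the flattened stream (len(set(flat[:flat.index(n)]))), a closed-form characterization of first-appearance rank, then formats all edges in one pass.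
import Mathlib
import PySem

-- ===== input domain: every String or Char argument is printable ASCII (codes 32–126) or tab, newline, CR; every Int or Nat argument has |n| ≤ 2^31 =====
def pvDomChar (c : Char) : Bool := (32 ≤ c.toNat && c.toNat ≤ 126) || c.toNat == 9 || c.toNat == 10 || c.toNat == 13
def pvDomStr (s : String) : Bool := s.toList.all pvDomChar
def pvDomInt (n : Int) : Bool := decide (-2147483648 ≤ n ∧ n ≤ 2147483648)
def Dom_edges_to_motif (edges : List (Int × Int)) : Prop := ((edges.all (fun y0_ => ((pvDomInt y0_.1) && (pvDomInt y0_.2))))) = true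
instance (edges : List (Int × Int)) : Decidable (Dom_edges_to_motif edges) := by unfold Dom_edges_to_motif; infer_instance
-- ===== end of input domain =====

-- B replaces A's mutable dict + running counter by a closed-form labeling: a node's
-- label is the count of distinct elements before its first occurrence in the
-- flattened edge stream (alternative decomposition, not faster).

-- ===== PORT A =====
-- A-side helper: the body of A's `for u, v in edges` loop.
-- State = (node_map, counter, lines).  `node_map[u]` after the two inserts can never
-- miss (the key was just ensured present), so `getD _ ""` is exact there.
def stepA (st : PySem.Dict Int String × Int × List String) (uv : Int × Int) :
    PySem.Dict Int String × Int × List String :=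
  let mc1 := if st.1.contains uv.1 = false
    then (st.1.insert uv.1 ("N" ++ PySem.Int.toStr st.2.1), st.2.1 + 1)
    else (st.1, st.2.1)
  let mc2 := if mc1.1.contains uv.2 = false
    then (mc1.1.insert uv.2 ("N" ++ PySem.Int.toStr mc1.2), mc1.2 + 1)
    else mc1
  (mc2.1, mc2.2, st.2.2 ++ [mc2.1.getD uv.1 "" ++ " -> " ++ mc2.1.getD uv.2 ""])

def edges_to_motif (edges : List (Int × Int)) : String :=
  PySem.Str.join "\n" (edges.foldl stepA (PySem.Dict.empty, 0, [])).2.2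

-- ===== PORT B =====
-- `flat.index(n)` can never raise (every labelled n is an endpoint, so n ∈ flat):
-- `getD 0` is exact; `flat[:i]` with the 0 ≤ i ≤ len(flat) returned by index is `take i`.
def edges_to_motif_alt (edges : List (Int × Int)) : String :=
  let flat : List Int := edges.flatMap fun uv => [uv.1, uv.2]
  let label : Int → String := fun n =>
    "N" ++ PySem.Int.toStr
      ((PySem.Set.len (PySem.Set.ofList (flat.take ((PySem.List.index? flat n).getD 0))) : Int))
  PySem.Str.join "\n" (edges.map fun uv => label uv.1 ++ " -> " ++ label uv.2)

-- ===== PRECONDITION & SPEC =====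
def Spec_edges_to_motif (edges : List (Int × Int)) (out : String) : Prop := out = edges_to_motif_alt edges
instance (edges : List (Int × Int)) (out : String) : Decidable (Spec_edges_to_motif edges out) := by unfold Spec_edges_to_motif; infer_instance

-- ===== CLAIM (what is proved, stated in full; the proofs are below) =====
def Claim_equal_edges_to_motif : Prop := ∀ (edges : List (Int × Int)), Dom_edges_to_motif edges → Spec_edges_to_motif edges (edges_to_motif edges)

-- ===== LEMMAS AND PROOFS =====

-- the distinct endpoints of p, in first-appearance order
def nodesOf (p : List (Int × Int)) : List Int :=
  PySem.List.dedup (p.flatMap fun uv => [uv.1, uv.2])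

-- the common characterization both ports are reduced to: label = position in nodesOf
def labelOf (ns : List Int) (n : Int) : String :=
  "N" ++ PySem.Int.toStr (((PySem.List.index? ns n).getD 0 : Nat) : Int)

def lineOf (ns : List Int) (uv : Int × Int) : String :=
  labelOf ns uv.1 ++ " -> " ++ labelOf ns uv.2

-- A's node_map after the nodes ns have been registered in order
def dictFor (ns : List Int) : PySem.Dict Int String :=
  PySem.Dict.mk (ns.zipIdx.map fun ni => (ni.1, "N" ++ PySem.Int.toStr (ni.2 : Int)))

-- A's whole loop state after processing the prefix p
def stateFor (p : List (Int × Int)) : PySem.Dict Int String × Int × List String :=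
  (dictFor (nodesOf p), ((nodesOf p).length : Int), p.map (lineOf (nodesOf p)))

lemma keys_dictFor (ns : List Int) : (dictFor ns).keys = ns := by
  simp [dictFor, PySem.Dict.keys, Function.comp_def]

lemma contains_dictFor (ns : List Int) (n : Int) :
    (dictFor ns).contains n = decide (n ∈ ns) := by
  rw [PySem.Dict.contains_eq_decide_mem_keys, keys_dictFor]

lemma insert_dictFor (ns : List Int) (u : Int) (h : u ∉ ns) :
    (dictFor ns).insert u ("N" ++ PySem.Int.toStr (ns.length : Int)) = dictFor (ns ++ [u]) := by
  apply PySem.Dict.ext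
  rw [PySem.Dict.items_insert_of_not_contains _ _ (by rw [contains_dictFor]; simpa using h)]
  simp [dictFor, List.zipIdx_append]

lemma getD_dictFor (ns : List Int) (n : Int) (hnd : ns.Nodup) (h : n ∈ ns) :
    (dictFor ns).getD n "" = labelOf ns n := by
  obtain ⟨k, hk⟩ : ∃ k, PySem.List.index? ns n = some k := by
    have := (PySem.List.index?_isSome_iff (xs := ns) (v := n)).mpr h
    exact Option.isSome_iff_exists.mp this
  obtain ⟨hlt, hget, -⟩ := PySem.List.getElem_of_index?_eq_some hk
  have hmem : (n, "N" ++ PySem.Int.toStr (k : Int)) ∈ (dictFor ns).items := by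
    simp only [dictFor]
    refine List.mem_map.mpr ⟨(n, k), ?_, rfl⟩
    rw [List.mem_zipIdx_iff_getElem?]
    simp [hget, hlt]
  rw [PySem.Dict.getD_of_mem_items _ hmem (by rw [keys_dictFor]; exact hnd)]
  unfold labelOf
  rw [hk]
  rfl

lemma nodesOf_append_singleton (p : List (Int × Int)) (uv : Int × Int) :
    nodesOf (p ++ [uv]) = PySem.Set.add (PySem.Set.add (nodesOf p) uv.1) uv.2 := by
  unfold nodesOf
  rw [List.flatMap_append]
  simp only [PySem.List.dedup_eq_ofList, List.flatMap_cons, List.flatMap_nil, List.append_nil]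
  rw [PySem.Set.ofList_append, PySem.Set.update_cons, PySem.Set.update_cons, PySem.Set.update_nil]

lemma mem_nodesOf (p : List (Int × Int)) (uv : Int × Int) (h : uv ∈ p) :
    uv.1 ∈ nodesOf p ∧ uv.2 ∈ nodesOf p := by
  unfold nodesOf
  rw [PySem.List.mem_dedup, PySem.List.mem_dedup]
  constructor <;> exact List.mem_flatMap.mpr ⟨uv, h, by simp⟩

lemma add2_eq_append (s : List Int) (a b : Int) :
    ∃ t, PySem.Set.add (PySem.Set.add s a) b = s ++ t := by
  by_cases ha : a ∈ s
  · rw [PySem.Set.add_of_mem ha]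
    by_cases hb : b ∈ s
    · exact ⟨[], by rw [PySem.Set.add_of_mem hb]; simp⟩
    · exact ⟨[b], PySem.Set.add_of_not_mem hb⟩
  · rw [PySem.Set.add_of_not_mem ha]
    by_cases hb : b ∈ s ++ [a]
    · exact ⟨[a], PySem.Set.add_of_mem hb⟩
    · exact ⟨[a, b], by rw [PySem.Set.add_of_not_mem hb, List.append_assoc]; rfl⟩

lemma nodup_nodesOf (p : List (Int × Int)) : (nodesOf p).Nodup :=
  PySem.List.nodup_dedup _

lemma labelOf_append (ns t : List Int) (n : Int) (h : n ∈ ns) :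
    labelOf (ns ++ t) n = labelOf ns n := by
  unfold labelOf
  rw [PySem.List.index?_append_of_mem t h]

-- proof-side view of stepA: registering uv.1 then uv.2 with regA
def regA (mc : PySem.Dict Int String × Int) (n : Int) : PySem.Dict Int String × Int :=
  if mc.1.contains n = false then (mc.1.insert n ("N" ++ PySem.Int.toStr mc.2), mc.2 + 1) else mc

lemma stepA_reg (m : PySem.Dict Int String) (c : Int) (lines : List String) (uv : Int × Int) :
    stepA (m, c, lines) uv =
      ((regA (regA (m, c) uv.1) uv.2).1, (regA (regA (m, c) uv.1) uv.2).2,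
        lines ++ [(regA (regA (m, c) uv.1) uv.2).1.getD uv.1 "" ++ " -> " ++
                  (regA (regA (m, c) uv.1) uv.2).1.getD uv.2 ""]) := rfl

lemma regA_dictFor (ns : List Int) (n : Int) :
    regA (dictFor ns, (ns.length : Int)) n
      = (dictFor (PySem.Set.add ns n), ((PySem.Set.add ns n).length : Int)) := by
  by_cases h : n ∈ ns
  · rw [PySem.Set.add_of_mem h]
    simp [regA, contains_dictFor, h]
  · simp only [regA, contains_dictFor, h, decide_false]
    rw [PySem.Set.add_of_not_mem h, insert_dictFor _ _ h]
    simp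

lemma stepA_stateFor (p : List (Int × Int)) (uv : Int × Int) :
    stepA (stateFor p) uv = stateFor (p ++ [uv]) := by
  have hndA : (nodesOf (p ++ [uv])).Nodup := nodup_nodesOf _
  have hmemu : uv.1 ∈ nodesOf (p ++ [uv]) := (mem_nodesOf _ uv (by simp)).1
  have hmemv : uv.2 ∈ nodesOf (p ++ [uv]) := (mem_nodesOf _ uv (by simp)).2
  have hreg : regA (regA (dictFor (nodesOf p), ((nodesOf p).length : Int)) uv.1) uv.2
      = (dictFor (nodesOf (p ++ [uv])), ((nodesOf (p ++ [uv])).length : Int)) := by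
    rw [regA_dictFor, regA_dictFor, ← nodesOf_append_singleton]
  rw [show stateFor p
        = (dictFor (nodesOf p), ((nodesOf p).length : Int), p.map (lineOf (nodesOf p))) from rfl,
      stepA_reg, hreg]
  obtain ⟨t, ht⟩ := add2_eq_append (nodesOf p) uv.1 uv.2
  have hext : nodesOf (p ++ [uv]) = nodesOf p ++ t := by
    rw [nodesOf_append_singleton, ht]
  unfold stateFor
  refine Prod.ext rfl (Prod.ext rfl ?_)
  show p.map (lineOf (nodesOf p)) ++ _ = _
  rw [List.map_append]
  congr 1
  · refine List.map_congr_left fun e he => ?_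
    obtain ⟨h1, h2⟩ := mem_nodesOf p e he
    unfold lineOf
    rw [hext, labelOf_append _ _ _ h1, labelOf_append _ _ _ h2]
  · simp only [List.map_cons, List.map_nil]
    rw [getD_dictFor _ _ hndA hmemu, getD_dictFor _ _ hndA hmemv]
    rfl

lemma loopA (rest p : List (Int × Int)) :
    rest.foldl stepA (stateFor p) = stateFor (p ++ rest) := by
  induction rest generalizing p with
  | nil => simp
  | cons uv rest ih =>
    rw [List.foldl_cons, stepA_stateFor, ih, List.append_assoc]
    rfl

lemma stateFor_nil : stateFor [] = (PySem.Dict.empty, 0, []) := rfl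

-- ===== B-side: the distinct-prefix count equals the position in the dedup list =====

lemma update_eq_append (l s : List Int) : ∃ t, PySem.Set.update s l = s ++ t := by
  induction l generalizing s with
  | nil => exact ⟨[], by rw [PySem.Set.update_nil]; simp⟩
  | cons x l ih =>
    rw [PySem.Set.update_cons]
    by_cases hx : x ∈ s
    · rw [PySem.Set.add_of_mem hx]; exact ih s
    · rw [PySem.Set.add_of_not_mem hx]
      obtain ⟨t, ht⟩ := ih (s ++ [x])
      exact ⟨[x] ++ t, by rw [ht, List.append_assoc]⟩

lemma index?_ofList_of_index? (xs : List Int) (n : Int) (i : Nat)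
    (h : PySem.List.index? xs n = some i) :
    PySem.List.index? (PySem.Set.ofList xs) n = some (PySem.Set.ofList (xs.take i)).length := by
  obtain ⟨pre, suf, hxs, hlen, hpre⟩ := (PySem.List.index?_eq_some_iff xs n i).mp h
  have hnmem : n ∉ PySem.Set.ofList pre := by
    rw [PySem.Set.mem_ofList]; exact hpre
  have htake : xs.take i = pre := by
    rw [hxs, ← hlen, List.take_left]
  have h1 : PySem.Set.ofList xs = (PySem.Set.ofList pre ++ [n]) ++
      (PySem.Set.update (PySem.Set.ofList pre ++ [n]) suf).drop (PySem.Set.ofList pre ++ [n]).length := by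
    obtain ⟨t, ht⟩ := update_eq_append suf (PySem.Set.ofList pre ++ [n])
    rw [hxs, show pre ++ n :: suf = pre ++ [n] ++ suf by simp, PySem.Set.ofList_append,
        PySem.Set.ofList_append, PySem.Set.update_cons, PySem.Set.update_nil,
        PySem.Set.add_of_not_mem hnmem, ht]
    simp
  rw [h1, PySem.List.index?_append_of_mem _ (by simp), htake]
  exact PySem.List.index?_append_singleton_self _ _ hnmem

lemma labelB_eq_labelOf (xs : List Int) (n : Int) (h : n ∈ xs) :
    "N" ++ PySem.Int.toStr
        ((PySem.Set.len (PySem.Set.ofList (xs.take ((PySem.List.index? xs n).getD 0))) : Int))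
      = labelOf (PySem.List.dedup xs) n := by
  obtain ⟨i, hi⟩ : ∃ i, PySem.List.index? xs n = some i :=
    Option.isSome_iff_exists.mp ((PySem.List.index?_isSome_iff xs n).mpr h)
  unfold labelOf
  rw [PySem.List.dedup_eq_ofList, index?_ofList_of_index? xs n i hi, hi]
  rfl

-- ===== VERDICT (by name: the statement is the Claim_ definition above) =====
theorem edges_to_motif_spec : Claim_equal_edges_to_motif := by
  intro edges _
  show edges_to_motif edges = edges_to_motif_alt edges
  unfold edges_to_motif
  rw [← stateFor_nil, loopA, List.nil_append]
  show PySem.Str.join "\n" (edges.map (lineOf (nodesOf edges))) = _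
  unfold edges_to_motif_alt
  congr 1
  refine (List.map_congr_left fun e he => ?_).symm
  have h1 : e.1 ∈ edges.flatMap (fun uv => [uv.1, uv.2]) := List.mem_flatMap.mpr ⟨e, he, by simp⟩
  have h2 : e.2 ∈ edges.flatMap (fun uv => [uv.1, uv.2]) := List.mem_flatMap.mpr ⟨e, he, by simp⟩
  unfold lineOf nodesOf
  rw [← labelB_eq_labelOf _ _ h1, ← labelB_eq_labelOf _ _ h2]
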